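/-
  THE DECODE BRIDGE of the flat user machine (the model's X86/Derived/User/Decode.lean, listed here with the gated form that
  this file adds): from a decode fact about a plain list of bytes, checked by the kernel by
  evaluation (`Dec.IsInsn Dec.allCells mode bytes s n`, X86/Derived/Dec/{Pure,Find}.lean), to `User.Decodes L μ u s`
  (X86/Derived/User/Step.lean) — "for every machine in the relation with `u`, the model's decoder at `u.rip` returns an
  instruction that runs as `Sem.run s μ`, and fetching leaves the machine in the relation".

      User.decMode has                 the `DecMode` of every machine in `User.Abs`: 64-bit mode, CS.D = 0, Intel — and
                                       the CPUID feature bits `has`, the ONE field the relation does not pin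
      User.Abs.decMode                 Abs L m u → DecMode.of m = User.decMode m.cfg.has
      User.Abs.fetchesAs               the relation meets the hypothesis of the model's bridging theorem (`Dec.FetchesAs`)
      User.Decodes.of_isInsn           (∀ has, IsInsn allCells (decMode has) bytes s n) → CodeAt → L.Has → Decodes L μ u s
      User.Step.of_isInsn              the same for `Sem.instr keep len body`, with the body's `wpUser` as the remaining goal
      User.Step.of_isInsn_at           … with the next RIP named (`u.rip + len = next`)
      User.Step.of_isInsn_own          … for a row whose body is the whole instruction (no `Sem.instr`)
      User.Decodes.of_isInsn_gated     the same for a cell that holds CPUID-gated rows (TZCNT / BSF, PAUSE / NOP …):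
      User.Step.of_isInsn_gated        the gate facts are hypotheses about the MACHINE's configuration

  WHAT IS ASKED OF `μ`: nothing. The decoder does not consult the processor record `μ` (`Dec.IsInsn` is a statement for
  every `μ`: `μ` only enters `Sem.run s μ`, on both sides). Vendor and CPUID are read from the MACHINE (`m.cfg`), and
  `User.Core` pins `m.cfg.vendor = .intel`.

  WHY `decMode` HAS A PARAMETER. `DecMode.of m` has the field `has := m.cfg.has`, and `User.Core` says nothing about the
  CPUID of the machine: there is no closed term that is the mode of every machine in the relation. A decode fact is therefore
  stated FOR EVERY `has` — which the kernel can check exactly when no row of the opcode's cell carries a CPUID gate (the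
  evaluation never asks `has` anything). That is the case for every instruction of a compiled C program that does not use
  BSF / BSR / TZCNT / LZCNT, multi-byte NOP in the MPX cells (0F 1A, 0F 1B), RDRAND / RDSEED, or the system cells 0F 01, 0F 38 …
  For a gated cell the fact is stated for the mode `decMode (Gates.apply G has)`, `G` a literal list `[(feature, value)]`
  that answers the gates of the cell, and the bridge asks `G.Hold m.cfg.has` of every machine in the relation — a
  hypothesis no proof can discharge before `User.Core` pins CPUID bits (the same gap as `requireFeature`, STRATEGY §5).
-/
import UserX.Basic
import X86.Derived.User.Decode
namespace X86
namespace User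

/- `User.decMode`, `User.Abs.decMode`, `User.Abs.fetchesAs`, `User.Decodes.of_isInsn_cfg`, `User.Decodes.of_isInsn`,
`User.Step.of_isInsn`, `User.Step.of_isInsn_at`, `User.Step.of_isInsn_own` are the model's (X86/Derived/User/Decode.lean), with
the statements this file used to prove. What stays here is the part for cells with CPUID-gated rows. -/

variable {L : Layout} {μ : Microarch} {m : Machine} {u : State}

/-! ### Cells with CPUID-gated rows -/

/-- Answers to the CPUID gates of a cell: a literal list of (feature, value). -/
abbrev Gates := List (FeatureBit × Bool)

namespace Gates

/-- `has`, with the listed features answered by the list (the first entry of a feature counts). On a literal list and a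
literal feature the kernel evaluates this to the listed value without looking at `has`. -/
def apply (G : Gates) (has : FeatureBit → Bool) : FeatureBit → Bool := fun f =>
  match G.find? (fun p => p.1 == f) with
  | some p => p.2
  | none => has f

/-- The CPUID `has` answers the listed features as the list does. -/
def Hold (G : Gates) (has : FeatureBit → Bool) : Prop := ∀ p ∈ G, has p.1 = p.2

/-- A CPUID that agrees with the list is not changed by it. -/
theorem apply_of_hold {G : Gates} {has : FeatureBit → Bool} (h : G.Hold has) : G.apply has = has := by
  funext f
  unfold apply
  cases hfind : G.find? (fun p => p.1 == f) with
  | none => rfl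
  | some p =>
    have hmem : p ∈ G := List.mem_of_find?_eq_some hfind
    have hkey : (p.1 == f) = true := List.find?_some (p := fun q : FeatureBit × Bool => q.1 == f) hfind
    have hf : p.1 = f := by simpa using hkey
    rw [← hf]
    exact (h p hmem).symm

end Gates

/-- **The bridge for a gated cell.** The fact is stated for every CPUID that answers the gates of the cell as `G` does;
every machine in the relation must answer them so. -/
theorem Decodes.of_isInsn_gated {G : Gates} {bytes : List Byte} {s : Sem Unit} {n : Nat}
    (hg : ∀ m, Abs L m u → G.Hold m.cfg.has)
    (hi : ∀ has, Dec.IsInsn Dec.allCells (decMode (G.apply has)) bytes s n)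
    (hc : CodeAt u.mem u.rip bytes) (hr : L.Has u.rip bytes.length) : Decodes L μ u s := by
  refine Decodes.of_isInsn_cfg (n := n) ?_ hc hr
  intro m hm
  have h := hi m.cfg.has
  rw [Gates.apply_of_hold (hg m hm)] at h
  exact h

/-- The step rule for an ordinary instruction of a gated cell. -/
theorem Step.of_isInsn_gated {G : Gates} {bytes : List Byte} {keep : Machine → Machine → Machine} {len : Word}
    {body : Sem Unit} {n : Nat} {Q : State → Prop}
    (hg : ∀ m, Abs L m u → G.Hold m.cfg.has)
    (hi : ∀ has, Dec.IsInsn Dec.allCells (decMode (G.apply has)) bytes (Sem.instr keep len body) n)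
    (hc : CodeAt u.mem u.rip bytes) (hr : L.Has u.rip bytes.length)
    (hw : ∀ m, Abs L m u → Sem.wpUser L μ body (fun _ u' => Q u') (fun _ _ => False) (u.setRip (u.rip + len))) :
    Step L μ u Q :=
  Step.of_instr keep len body (Decodes.of_isInsn_gated hg hi hc hr) hw

end User
end X86
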